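-- pv_equiv track=rewrite | github.com/josephtingiris/vscode-alternative-keybindings | bin/keybindings-model.py | tags_for
-- ===== SOURCE A (Python) =====
-- VI_KEYS = {"h", "j", "k", "l"}
--
-- ARROW_KEYS = {"end", "home", "pageup", "pagedown", "left", "down", "up", "right"}
--
-- LEFT_GROUP = {"h", "[", ";", ",", "left"}
--
-- DOWN_GROUP = {"j", "down", "pagedown"}
--
-- UP_GROUP = {"k", "up", "pageup"}
--
-- RIGHT_GROUP = {"l", "]", "'", ".", "right"}
--
-- TAG_ORDER = ["(arrow)", "(down)", "(left)", "(right)", "(up)", "(vi)"]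
--
-- def tags_for(key):
--     tags = []
--     if key in VI_KEYS:
--         tags.append("(vi)")
--     if key in ARROW_KEYS:
--         tags.append("(arrow)")
--     if key in LEFT_GROUP:
--         tags.append("(left)")
--     if key in DOWN_GROUP:
--         tags.append("(down)")
--     if key in UP_GROUP:
--         tags.append("(up)")
--     if key in RIGHT_GROUP:
--         tags.append("(right)")
--     # Sort tags according to TAG_ORDER
--     tags_sorted = [t for t in TAG_ORDER if t in tags]
--     return tags_sorted
-- ===== SOURCE B (Python) =====
-- # One precomputed lookup table (values listed in TAG_ORDER), a single dict.get per call.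
-- KEY_TAGS = {
--     "end": ["(arrow)"],
--     "home": ["(arrow)"],
--     "pageup": ["(arrow)", "(up)"],
--     "pagedown": ["(arrow)", "(down)"],
--     "left": ["(arrow)", "(left)"],
--     "down": ["(arrow)", "(down)"],
--     "up": ["(arrow)", "(up)"],
--     "right": ["(arrow)", "(right)"],
--     "j": ["(down)", "(vi)"],
--     "h": ["(left)", "(vi)"],
--     "[": ["(left)"],
--     ";": ["(left)"],
--     ",": ["(left)"],
--     "l": ["(right)", "(vi)"],
--     "]": ["(right)"],
--     "'": ["(right)"],
--     ".": ["(right)"],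
--     "k": ["(up)", "(vi)"],
-- }
--
-- def tags_for(key):
--     return list(KEY_TAGS.get(key, []))
-- ===== Notes on version B (the rewrite author's own statement) =====
-- stated objective: simpler
-- what changed: Replaces six sequential set-membership branches plus a final TAG_ORDER filter with one precomputed key-to-tags table whose values are already listed in TAG_ORDER; each call is a single dict lookup returning a fresh copy.
import Mathlib
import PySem

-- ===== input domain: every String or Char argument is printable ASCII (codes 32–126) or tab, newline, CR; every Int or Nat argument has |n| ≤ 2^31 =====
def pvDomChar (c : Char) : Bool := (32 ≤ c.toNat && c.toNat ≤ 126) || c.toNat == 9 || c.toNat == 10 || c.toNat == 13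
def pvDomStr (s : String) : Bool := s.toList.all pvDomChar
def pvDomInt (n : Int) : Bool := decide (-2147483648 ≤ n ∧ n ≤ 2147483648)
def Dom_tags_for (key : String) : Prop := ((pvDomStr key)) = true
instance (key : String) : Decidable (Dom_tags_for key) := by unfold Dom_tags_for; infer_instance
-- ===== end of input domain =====

-- B replaces A's six sequential set-membership branches + final TAG_ORDER filter by one
-- precomputed key→tags table (values already in TAG_ORDER) and a single lookup. Objective: simpler.

-- ===== PORT A =====
def VI_KEYS : PySem.Set String := PySem.Set.ofList ["h", "j", "k", "l"]
def ARROW_KEYS : PySem.Set String := PySem.Set.ofList ["end", "home", "pageup", "pagedown", "left", "down", "up", "right"]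
def LEFT_GROUP : PySem.Set String := PySem.Set.ofList ["h", "[", ";", ",", "left"]
def DOWN_GROUP : PySem.Set String := PySem.Set.ofList ["j", "down", "pagedown"]
def UP_GROUP : PySem.Set String := PySem.Set.ofList ["k", "up", "pageup"]
def RIGHT_GROUP : PySem.Set String := PySem.Set.ofList ["l", "]", "'", ".", "right"]
def TAG_ORDER : List String := ["(arrow)", "(down)", "(left)", "(right)", "(up)", "(vi)"]

def tags_for (key : String) : List String :=
  let tags : List String := []
  let tags := if PySem.Set.contains VI_KEYS key then tags ++ ["(vi)"] else tags
  let tags := if PySem.Set.contains ARROW_KEYS key then tags ++ ["(arrow)"] else tags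
  let tags := if PySem.Set.contains LEFT_GROUP key then tags ++ ["(left)"] else tags
  let tags := if PySem.Set.contains DOWN_GROUP key then tags ++ ["(down)"] else tags
  let tags := if PySem.Set.contains UP_GROUP key then tags ++ ["(up)"] else tags
  let tags := if PySem.Set.contains RIGHT_GROUP key then tags ++ ["(right)"] else tags
  TAG_ORDER.filter (fun t => tags.contains t)

-- ===== PORT B =====
-- Source B's dict literal has pairwise-distinct keys, so its items are exactly these pairs
-- in this order: Dict.mk of that list is the exact dict literal.
def KEY_TAGS : PySem.Dict String (List String) :=
  PySem.Dict.mk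
   [("end", ["(arrow)"]),
    ("home", ["(arrow)"]),
    ("pageup", ["(arrow)", "(up)"]),
    ("pagedown", ["(arrow)", "(down)"]),
    ("left", ["(arrow)", "(left)"]),
    ("down", ["(arrow)", "(down)"]),
    ("up", ["(arrow)", "(up)"]),
    ("right", ["(arrow)", "(right)"]),
    ("j", ["(down)", "(vi)"]),
    ("h", ["(left)", "(vi)"]),
    ("[", ["(left)"]),
    (";", ["(left)"]),
    (",", ["(left)"]),
    ("l", ["(right)", "(vi)"]),
    ("]", ["(right)"]),
    ("'", ["(right)"]),
    (".", ["(right)"]),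
    ("k", ["(up)", "(vi)"])]

def tags_for_alt (key : String) : List String :=
  KEY_TAGS.getD key []

-- ===== PRECONDITION & SPEC =====
def Spec_tags_for (key : String) (out : List String) : Prop := out = tags_for_alt key
instance (key : String) (out : List String) : Decidable (Spec_tags_for key out) := by unfold Spec_tags_for; infer_instance

-- ===== CLAIM (what is proved, stated in full; the proofs are below) =====
def Claim_equal_tags_for : Prop := ∀ (key : String), Dom_tags_for key → Spec_tags_for key (tags_for key)

-- ===== LEMMAS AND PROOFS =====

-- each group set, evaluated once to its literal element list (all elements distinct)
theorem VI_KEYS_eq : VI_KEYS = ["h", "j", "k", "l"] := by decide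
theorem ARROW_KEYS_eq : ARROW_KEYS = ["end", "home", "pageup", "pagedown", "left", "down", "up", "right"] := by decide
theorem LEFT_GROUP_eq : LEFT_GROUP = ["h", "[", ";", ",", "left"] := by decide
theorem DOWN_GROUP_eq : DOWN_GROUP = ["j", "down", "pagedown"] := by decide
theorem UP_GROUP_eq : UP_GROUP = ["k", "up", "pageup"] := by decide
theorem RIGHT_GROUP_eq : RIGHT_GROUP = ["l", "]", "'", ".", "right"] := by decide

-- every key occurring in A's groups / stored in B's table
def allKeys : List String :=
  ["h", "j", "k", "l", "end", "home", "pageup", "pagedown",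
   "left", "down", "up", "right", "[", ";", ",", "]", "'", "."]

theorem tags_for_eq_of_mem (key : String) (h : key ∈ allKeys) :
    tags_for key = tags_for_alt key := by
  simp only [allKeys, List.mem_cons, List.not_mem_nil, or_false] at h
  rcases h with rfl | rfl | rfl | rfl | rfl | rfl | rfl | rfl | rfl | rfl | rfl | rfl | rfl | rfl | rfl | rfl | rfl | rfl <;>
    simp only [tags_for, tags_for_alt, KEY_TAGS, VI_KEYS_eq, ARROW_KEYS_eq, LEFT_GROUP_eq,
      DOWN_GROUP_eq, UP_GROUP_eq, RIGHT_GROUP_eq, TAG_ORDER, PySem.Set.contains,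
      PySem.Dict.getD, PySem.Dict.get?, List.nil_append, List.cons_append,
      List.contains, List.elem_nil, List.elem_cons, List.find?, List.filter,
      String.reduceBEq, if_true, if_false,
      Option.getD, Option.map, Bool.false_eq_true]

theorem tags_for_eq_of_not_mem (key : String) (h : key ∉ allKeys) :
    tags_for key = tags_for_alt key := by
  simp only [allKeys, List.mem_cons, List.not_mem_nil, or_false, not_or] at h
  obtain ⟨h1, h2, h3, h4, h5, h6, h7, h8, h9, h10, h11, h12, h13, h14, h15, h16, h17, h18⟩ := h
  have b1 : (key == "h") = false := beq_eq_false_iff_ne.mpr h1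
  have c1 : (("h" : String) == key) = false := beq_eq_false_iff_ne.mpr (Ne.symm h1)
  have b2 : (key == "j") = false := beq_eq_false_iff_ne.mpr h2
  have c2 : (("j" : String) == key) = false := beq_eq_false_iff_ne.mpr (Ne.symm h2)
  have b3 : (key == "k") = false := beq_eq_false_iff_ne.mpr h3
  have c3 : (("k" : String) == key) = false := beq_eq_false_iff_ne.mpr (Ne.symm h3)
  have b4 : (key == "l") = false := beq_eq_false_iff_ne.mpr h4
  have c4 : (("l" : String) == key) = false := beq_eq_false_iff_ne.mpr (Ne.symm h4)
  have b5 : (key == "end") = false := beq_eq_false_iff_ne.mpr h5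
  have c5 : (("end" : String) == key) = false := beq_eq_false_iff_ne.mpr (Ne.symm h5)
  have b6 : (key == "home") = false := beq_eq_false_iff_ne.mpr h6
  have c6 : (("home" : String) == key) = false := beq_eq_false_iff_ne.mpr (Ne.symm h6)
  have b7 : (key == "pageup") = false := beq_eq_false_iff_ne.mpr h7
  have c7 : (("pageup" : String) == key) = false := beq_eq_false_iff_ne.mpr (Ne.symm h7)
  have b8 : (key == "pagedown") = false := beq_eq_false_iff_ne.mpr h8
  have c8 : (("pagedown" : String) == key) = false := beq_eq_false_iff_ne.mpr (Ne.symm h8)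
  have b9 : (key == "left") = false := beq_eq_false_iff_ne.mpr h9
  have c9 : (("left" : String) == key) = false := beq_eq_false_iff_ne.mpr (Ne.symm h9)
  have b10 : (key == "down") = false := beq_eq_false_iff_ne.mpr h10
  have c10 : (("down" : String) == key) = false := beq_eq_false_iff_ne.mpr (Ne.symm h10)
  have b11 : (key == "up") = false := beq_eq_false_iff_ne.mpr h11
  have c11 : (("up" : String) == key) = false := beq_eq_false_iff_ne.mpr (Ne.symm h11)
  have b12 : (key == "right") = false := beq_eq_false_iff_ne.mpr h12
  have c12 : (("right" : String) == key) = false := beq_eq_false_iff_ne.mpr (Ne.symm h12)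
  have b13 : (key == "[") = false := beq_eq_false_iff_ne.mpr h13
  have c13 : (("[" : String) == key) = false := beq_eq_false_iff_ne.mpr (Ne.symm h13)
  have b14 : (key == ";") = false := beq_eq_false_iff_ne.mpr h14
  have c14 : ((";" : String) == key) = false := beq_eq_false_iff_ne.mpr (Ne.symm h14)
  have b15 : (key == ",") = false := beq_eq_false_iff_ne.mpr h15
  have c15 : (("," : String) == key) = false := beq_eq_false_iff_ne.mpr (Ne.symm h15)
  have b16 : (key == "]") = false := beq_eq_false_iff_ne.mpr h16
  have c16 : (("]" : String) == key) = false := beq_eq_false_iff_ne.mpr (Ne.symm h16)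
  have b17 : (key == "'") = false := beq_eq_false_iff_ne.mpr h17
  have c17 : (("'" : String) == key) = false := beq_eq_false_iff_ne.mpr (Ne.symm h17)
  have b18 : (key == ".") = false := beq_eq_false_iff_ne.mpr h18
  have c18 : (("." : String) == key) = false := beq_eq_false_iff_ne.mpr (Ne.symm h18)
  simp only [tags_for, tags_for_alt, KEY_TAGS, VI_KEYS_eq, ARROW_KEYS_eq, LEFT_GROUP_eq,
    DOWN_GROUP_eq, UP_GROUP_eq, RIGHT_GROUP_eq, TAG_ORDER, PySem.Set.contains,
    PySem.Dict.getD, PySem.Dict.get?,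
    List.nil_append,
    List.contains, List.elem_nil, List.elem_cons, List.find?, List.filter,
    if_false, Option.getD, Option.map,
    Bool.false_eq_true,
    b1, b2, b3, b4, b5, b6, b7, b8, b9, b10, b11, b12, b13, b14, b15, b16, b17, b18,
    c1, c2, c3, c4, c5, c6, c7, c8, c9, c10, c11, c12, c13, c14, c15, c16, c17, c18]

-- ===== VERDICT (by name: the statement is the Claim_ definition above) =====
theorem tags_for_spec : Claim_equal_tags_for := by
  intro key _
  unfold Spec_tags_for
  by_cases h : key ∈ allKeys
  · exact tags_for_eq_of_mem key h
  · exact tags_for_eq_of_not_mem key h
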